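-- pv_equiv track=rewrite | github.com/tonygwu/2048-bot | strategy_powerup_weighted.py | _delete_candidates
-- ===== SOURCE A (Python) =====
-- from collections import Counter, OrderedDict
--
-- def _delete_candidates(board: list[list[int]], empties: int, max_tile: int) -> list[int]:
--     counts = Counter(board[r][c] for r in range(4) for c in range(4) if board[r][c] > 0)
--     candidates: list[int] = [2, 4, 8]
--     if empties <= 5:
--         candidates += [16, 32]
--     if max_tile >= 1024 and empties <= 5:
--         candidates += [64]
--     if max_tile >= 2048 and empties <= 4:
--         candidates += [128]
--     if max_tile >= 4096 and empties <= 3: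
--         candidates += [256]
--
--     late_cap = max(64, max_tile // 4) if max_tile > 0 else 64
--     dup_values = sorted(v for v, cnt in counts.items() if cnt >= 2 and v <= late_cap)
--     candidates.extend(dup_values)
--
--     singleton_cap = 0
--     if max_tile >= 1024 and empties <= 4:
--         singleton_cap = max(128, max_tile // 16)
--     if singleton_cap > 0:
--         singleton_values = sorted(v for v, cnt in counts.items() if cnt == 1 and v <= singleton_cap)
--         candidates.extend(singleton_values)
--
--     out: list[int] = []
--     seen: set[int] = set()
--     for v in candidates:
--         if v not in counts or v in seen:
--             continue
--         seen.add(v)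
--         out.append(v)
--     return out
-- ===== SOURCE B (Python) =====
-- def _tier(v, cnt, empties, max_tile, late_cap, singleton_cap):
--     if (v in (2, 4, 8)
--             or (v in (16, 32) and empties <= 5)
--             or (v == 64 and max_tile >= 1024 and empties <= 5)
--             or (v == 128 and max_tile >= 2048 and empties <= 4)
--             or (v == 256 and max_tile >= 4096 and empties <= 3)):
--         return 0
--     if cnt >= 2 and v <= late_cap:
--         return 1
--     if cnt == 1 and v <= singleton_cap:
--         return 2
--     return None
--
--
-- def _delete_candidates(board: list[list[int]], empties: int, max_tile: int) -> list[int]: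
--     tiles = sorted(board[r][c] for r in range(4) for c in range(4) if board[r][c] > 0)
--     late_cap = max(64, max_tile // 4) if max_tile > 0 else 64
--     singleton_cap = max(128, max_tile // 16) if (max_tile >= 1024 and empties <= 4) else 0
--     buckets = ([], [], [])
--     i, n = 0, len(tiles)
--     while i < n:
--         v = tiles[i]
--         j = i
--         while j < n and tiles[j] == v:
--             j += 1
--         t = _tier(v, j - i, empties, max_tile, late_cap, singleton_cap)
--         if t is not None:
--             buckets[t].append(v)
--         i = j
--     return buckets[0] + buckets[1] + buckets[2]
-- ===== Notes on version B (the rewrite author's own statement) =====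
-- stated objective: alternative
-- what changed: A builds a Counter and a conditionally-extended candidate list plus two sorted comprehensions and then dedups with a seen-set loop; B never builds a Counter or candidate list: it sorts the positive tiles, scans the sorted list once taking counts from adjacent groups, classifies each distinct value into a tier (base-active/duplicate/singleton) and distributes it into one of three buckets, returning their concatenation.
import Mathlib
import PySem

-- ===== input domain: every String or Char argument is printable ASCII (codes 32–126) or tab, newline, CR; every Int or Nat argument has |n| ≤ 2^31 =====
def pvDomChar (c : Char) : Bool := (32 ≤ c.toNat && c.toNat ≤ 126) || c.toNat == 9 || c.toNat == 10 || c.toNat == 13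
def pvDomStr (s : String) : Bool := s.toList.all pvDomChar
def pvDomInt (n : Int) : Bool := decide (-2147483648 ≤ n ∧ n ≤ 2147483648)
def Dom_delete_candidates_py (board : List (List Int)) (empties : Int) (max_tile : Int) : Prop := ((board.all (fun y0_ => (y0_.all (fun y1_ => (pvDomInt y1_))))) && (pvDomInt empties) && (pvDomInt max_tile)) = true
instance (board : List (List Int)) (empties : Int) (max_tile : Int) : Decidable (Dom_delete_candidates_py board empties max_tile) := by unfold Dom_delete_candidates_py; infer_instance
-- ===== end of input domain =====

-- B replaces A's Counter + conditional candidate-list + seen-set dedup by sorting the positive tiles,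
-- scanning adjacent groups once (counts by grouping) and distributing each distinct value into one of
-- three tier buckets (an alternative decomposition of the same task).


-- ===== PORT A =====
-- board[r][c] for r in range(4) for c in range(4) if board[r][c] > 0:
-- the same generator occurs verbatim in both Pythons, so the helper is shared.
def pvCells (board : List (List Int)) : List Int :=
  (PySem.List.pyRange 0 4 1).flatMap (fun r =>
    ((PySem.List.pyRange 0 4 1).map
      (fun c => PySem.List.pyGetD (PySem.List.pyGetD board r []) c 0)).filter (fun x => decide (0 < x)))

def delete_candidates_py (board : List (List Int)) (empties : Int) (max_tile : Int) : List Int :=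
  let counts := PySem.Dict.counter (pvCells board)
  let candidates : List Int := [2, 4, 8]
  let candidates := if empties ≤ 5 then candidates ++ [16, 32] else candidates
  let candidates := if 1024 ≤ max_tile ∧ empties ≤ 5 then candidates ++ [64] else candidates
  let candidates := if 2048 ≤ max_tile ∧ empties ≤ 4 then candidates ++ [128] else candidates
  let candidates := if 4096 ≤ max_tile ∧ empties ≤ 3 then candidates ++ [256] else candidates
  let late_cap := if 0 < max_tile then max 64 (PySem.Int.floordiv max_tile 4) else 64
  let dup_values := PySem.List.sorted
    ((counts.items.filter (fun p => decide (2 ≤ p.2) && decide (p.1 ≤ late_cap))).map Prod.fst)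
    (fun x => x) false
  let candidates := candidates ++ dup_values
  let singleton_cap : Int := 0
  let singleton_cap := if 1024 ≤ max_tile ∧ empties ≤ 4 then max 128 (PySem.Int.floordiv max_tile 16) else singleton_cap
  let candidates := if 0 < singleton_cap then
      candidates ++ PySem.List.sorted
        ((counts.items.filter (fun p => p.2 == 1 && decide (p.1 ≤ singleton_cap))).map Prod.fst)
        (fun x => x) false
    else candidates
  let st := candidates.foldl
    (fun (st : PySem.Set Int × List Int) v =>
      if !counts.contains v || PySem.Set.contains st.1 v then st
      else (PySem.Set.add st.1 v, st.2 ++ [v]))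
    (PySem.Set.empty, [])
  st.2

-- ===== PORT B =====
-- _tier(v, cnt, empties, max_tile, late_cap, singleton_cap) from Source B (None -> none)
def pvTier (v cnt empties max_tile late_cap singleton_cap : Int) : Option Int :=
  if (v = 2 ∨ v = 4 ∨ v = 8)
      ∨ ((v = 16 ∨ v = 32) ∧ empties ≤ 5)
      ∨ (v = 64 ∧ 1024 ≤ max_tile ∧ empties ≤ 5)
      ∨ (v = 128 ∧ 2048 ≤ max_tile ∧ empties ≤ 4)
      ∨ (v = 256 ∧ 4096 ≤ max_tile ∧ empties ≤ 3) then some 0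
  else if 2 ≤ cnt ∧ v ≤ late_cap then some 1
  else if cnt = 1 ∧ v ≤ singleton_cap then some 2
  else none

-- Source B's while-loop over the sorted tiles: each step consumes one adjacent group of equal values
-- (the inner 'while tiles[j] == v' is the takeWhile/dropWhile split) and prepends v to the bucket
-- named by its tier; the three buckets are the loop's state.
def pvScan (empties max_tile late_cap singleton_cap : Int) :
    List Int → List Int × List Int × List Int
  | [] => ([], [], [])
  | v :: rest =>
    let grp := rest.takeWhile (· == v)
    let rest' := rest.dropWhile (· == v)
    let bs := pvScan empties max_tile late_cap singleton_cap rest'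
    match pvTier v (1 + grp.length) empties max_tile late_cap singleton_cap with
    | none => bs
    | some t =>
      if t = 0 then (v :: bs.1, bs.2.1, bs.2.2)
      else if t = 1 then (bs.1, v :: bs.2.1, bs.2.2)
      else (bs.1, bs.2.1, v :: bs.2.2)
  termination_by xs => xs.length
  decreasing_by
    simp only [List.length_cons]
    exact Nat.lt_succ_of_le (List.dropWhile_sublist _ |>.length_le)

def delete_candidates_py_alt (board : List (List Int)) (empties : Int) (max_tile : Int) : List Int :=
  let tiles := PySem.List.sorted (pvCells board) (fun x => x) false
  let late_cap := if 0 < max_tile then max 64 (PySem.Int.floordiv max_tile 4) else 64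
  let singleton_cap := if 1024 ≤ max_tile ∧ empties ≤ 4 then max 128 (PySem.Int.floordiv max_tile 16) else (0 : Int)
  let bs := pvScan empties max_tile late_cap singleton_cap tiles
  bs.1 ++ bs.2.1 ++ bs.2.2

-- ===== PRECONDITION & SPEC =====
-- Python A indexes board[r][c] for r, c in range(4): it raises IndexError unless the board has
-- at least 4 rows whose first 4 each have at least 4 entries; exactly those inputs are excluded.
def Pre_delete_candidates_py (board : List (List Int)) (empties : Int) (max_tile : Int) : Prop :=
  4 ≤ board.length ∧ ∀ row ∈ board.take 4, 4 ≤ row.length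
instance (board : List (List Int)) (empties : Int) (max_tile : Int) : Decidable (Pre_delete_candidates_py board empties max_tile) := by unfold Pre_delete_candidates_py; infer_instance

def pvWitness_delete_candidates_py : List (List Int) × Int × Int :=
  ([[2, 2, 0, 0], [0, 4, 0, 0], [0, 0, 0, 0], [0, 0, 0, 0]], 6, 4)

def Spec_delete_candidates_py (board : List (List Int)) (empties : Int) (max_tile : Int) (out : List Int) : Prop := out = delete_candidates_py_alt board empties max_tile
instance (board : List (List Int)) (empties : Int) (max_tile : Int) (out : List Int) : Decidable (Spec_delete_candidates_py board empties max_tile out) := by unfold Spec_delete_candidates_py; infer_instance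

-- ===== CLAIM (what is proved, stated in full; the proofs are below) =====
def Claim_equal_delete_candidates_py : Prop := ∀ (board : List (List Int)) (empties : Int) (max_tile : Int), Dom_delete_candidates_py board empties max_tile → Pre_delete_candidates_py board empties max_tile → Spec_delete_candidates_py board empties max_tile (delete_candidates_py board empties max_tile)

-- ===== LEMMAS AND PROOFS =====

-- proof-side names for the sub-expressions of the two ports
def pvActive (empties max_tile v : Int) : Bool :=
  if v = 2 ∨ v = 4 ∨ v = 8 then true
  else if v = 16 ∨ v = 32 then decide (empties ≤ 5)
  else if v = 64 then decide (1024 ≤ max_tile ∧ empties ≤ 5)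
  else if v = 128 then decide (2048 ≤ max_tile ∧ empties ≤ 4)
  else if v = 256 then decide (4096 ≤ max_tile ∧ empties ≤ 3)
  else false

def pvBase (empties max_tile : Int) : List Int :=
  let candidates : List Int := [2, 4, 8]
  let candidates := if empties ≤ 5 then candidates ++ [16, 32] else candidates
  let candidates := if 1024 ≤ max_tile ∧ empties ≤ 5 then candidates ++ [64] else candidates
  let candidates := if 2048 ≤ max_tile ∧ empties ≤ 4 then candidates ++ [128] else candidates
  let candidates := if 4096 ≤ max_tile ∧ empties ≤ 3 then candidates ++ [256] else candidates
  candidates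

def pvLC (max_tile : Int) : Int :=
  if 0 < max_tile then max 64 (PySem.Int.floordiv max_tile 4) else 64

def pvSC (empties max_tile : Int) : Int :=
  if 1024 ≤ max_tile ∧ empties ≤ 4 then max 128 (PySem.Int.floordiv max_tile 16) else 0

def pvDup (cells : List Int) (max_tile : Int) : List Int :=
  PySem.List.sorted
    (((PySem.Dict.counter cells).items.filter
        (fun p => decide (2 ≤ p.2) && decide (p.1 ≤ pvLC max_tile))).map Prod.fst)
    (fun x => x) false

def pvSing (cells : List Int) (empties max_tile : Int) : List Int :=
  PySem.List.sorted
    (((PySem.Dict.counter cells).items.filter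
        (fun p => p.2 == 1 && decide (p.1 ≤ pvSC empties max_tile))).map Prod.fst)
    (fun x => x) false

-- the canonical middle form both ports are reduced to: three filters over the sorted present values
def pvRHS (cells : List Int) (e mt : Int) : List Int :=
  ((PySem.List.sorted (PySem.Dict.counter cells).keys (fun x => x) false).filter
      (fun v => pvActive e mt v))
  ++ ((PySem.List.sorted (PySem.Dict.counter cells).keys (fun x => x) false).filter
      (fun v => !pvActive e mt v
        && decide (2 ≤ (PySem.Dict.counter cells).getD v 0) && decide (v ≤ pvLC mt)))
  ++ ((PySem.List.sorted (PySem.Dict.counter cells).keys (fun x => x) false).filter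
      (fun v => !pvActive e mt v
        && ((PySem.Dict.counter cells).getD v 0 == 1) && decide (v ≤ pvSC e mt)))

-- A's dedup loop, split into its two state components
def pvDD (counts : PySem.Dict Int Int) : List Int → PySem.Set Int → List Int
  | [], _ => []
  | v :: vs, s =>
    if !counts.contains v || PySem.Set.contains s v then pvDD counts vs s
    else v :: pvDD counts vs (PySem.Set.add s v)

def pvSeen (counts : PySem.Dict Int Int) : List Int → PySem.Set Int → PySem.Set Int
  | [], s => s
  | v :: vs, s =>
    if !counts.contains v || PySem.Set.contains s v then pvSeen counts vs s
    else pvSeen counts vs (PySem.Set.add s v)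

theorem pvFold (counts : PySem.Dict Int Int) (cand : List Int) :
    ∀ (s : PySem.Set Int) (o : List Int),
    cand.foldl
      (fun (st : PySem.Set Int × List Int) v =>
        if !counts.contains v || PySem.Set.contains st.1 v then st
        else (PySem.Set.add st.1 v, st.2 ++ [v]))
      (s, o)
    = (pvSeen counts cand s, o ++ pvDD counts cand s) := by
  induction cand with
  | nil => intro s o; simp [pvSeen, pvDD]
  | cons v vs ih =>
    intro s o
    rw [List.foldl_cons]
    dsimp only
    by_cases h : (!counts.contains v || PySem.Set.contains s v) = true
    · rw [if_pos h, ih, pvSeen, pvDD, if_pos h, if_pos h]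
    · rw [if_neg h, ih, pvSeen, pvDD, if_neg h, if_neg h, List.append_assoc]
      rfl

theorem pvCondSplit {counts : PySem.Dict Int Int} {s : PySem.Set Int} {v : Int}
    (h : ¬(!counts.contains v || PySem.Set.contains s v) = true) :
    counts.contains v = true ∧ v ∉ s := by
  constructor
  · cases hc : counts.contains v
    · simp [hc] at h
    · rfl
  · intro hm
    have hb : PySem.Set.contains s v = true := (PySem.Set.contains_iff s v).mpr hm
    exact h (by rw [hb, Bool.or_true])

theorem pvSeen_mem (counts : PySem.Dict Int Int) (cand : List Int) :
    ∀ (s : PySem.Set Int) (v : Int),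
    v ∈ pvSeen counts cand s ↔ v ∈ s ∨ (v ∈ cand ∧ counts.contains v = true) := by
  induction cand with
  | nil => intro s v; simp [pvSeen]
  | cons w ws ih =>
    intro s v
    by_cases h : (!counts.contains w || PySem.Set.contains s w) = true
    · rw [pvSeen, if_pos h, ih]
      constructor
      · rintro (hs | ⟨hm, h2⟩)
        · exact Or.inl hs
        · exact Or.inr ⟨List.mem_cons_of_mem _ hm, h2⟩
      · rintro (hs | ⟨hm, h2⟩)
        · exact Or.inl hs
        · rcases List.mem_cons.mp hm with rfl | hm'
          · rcases Bool.or_eq_true .. |>.mp h with h' | h'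
            · rw [Bool.not_eq_eq_eq_not, Bool.not_true] at h'
              rw [h'] at h2; cases h2
            · exact Or.inl ((PySem.Set.contains_iff s v).mp h')
          · exact Or.inr ⟨hm', h2⟩
    · obtain ⟨hcw, hsw⟩ := pvCondSplit h
      rw [pvSeen, if_neg h, ih]
      constructor
      · rintro (hs | ⟨hm, h2⟩)
        · rcases (PySem.Set.mem_add s w v).mp hs with hs' | rfl
          · exact Or.inl hs'
          · exact Or.inr ⟨List.mem_cons.mpr (Or.inl rfl), hcw⟩
        · exact Or.inr ⟨List.mem_cons_of_mem _ hm, h2⟩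
      · rintro (hs | ⟨hm, h2⟩)
        · exact Or.inl ((PySem.Set.mem_add s w v).mpr (Or.inl hs))
        · rcases List.mem_cons.mp hm with rfl | hm'
          · exact Or.inl ((PySem.Set.mem_add s v v).mpr (Or.inr rfl))
          · exact Or.inr ⟨hm', h2⟩

theorem pvDD_append (counts : PySem.Dict Int Int) (xs ys : List Int) :
    ∀ s, pvDD counts (xs ++ ys) s = pvDD counts xs s ++ pvDD counts ys (pvSeen counts xs s) := by
  induction xs with
  | nil => intro s; simp [pvDD, pvSeen]
  | cons v vs ih =>
    intro s
    by_cases h : (!counts.contains v || PySem.Set.contains s v) = true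
    · rw [List.cons_append, pvDD, if_pos h, pvDD, if_pos h, pvSeen, if_pos h, ih]
    · rw [List.cons_append, pvDD, if_neg h, pvDD, if_neg h, pvSeen, if_neg h, ih,
        List.cons_append]

theorem pvDD_filter (counts : PySem.Dict Int Int) (xs : List Int) :
    ∀ s, xs.Nodup →
    pvDD counts xs s = xs.filter (fun v => counts.contains v && !PySem.Set.contains s v) := by
  induction xs with
  | nil => intro s _; simp [pvDD]
  | cons v vs ih =>
    intro s hnd
    rcases List.nodup_cons.mp hnd with ⟨hv, hnd'⟩
    by_cases h : (!counts.contains v || PySem.Set.contains s v) = true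
    · rw [pvDD, if_pos h, ih s hnd', List.filter_cons]
      have hpred : (counts.contains v && !PySem.Set.contains s v) = false := by
        rcases Bool.or_eq_true .. |>.mp h with h' | h'
        · rw [Bool.not_eq_eq_eq_not, Bool.not_true] at h'
          rw [h', Bool.false_and]
        · rw [h', Bool.not_true, Bool.and_false]
      simp only [hpred, Bool.false_eq_true, if_false]
    · obtain ⟨hcw, hsw⟩ := pvCondSplit h
      have hsw' : PySem.Set.contains s v = false := by
        cases hb : PySem.Set.contains s v
        · rfl
        · exact absurd ((PySem.Set.contains_iff s v).mp hb) hsw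
      have hpred : (counts.contains v && !PySem.Set.contains s v) = true := by
        rw [hcw, hsw']; rfl
      have hcongr :
          List.filter (fun u => counts.contains u && !PySem.Set.contains (PySem.Set.add s v) u) vs
            = List.filter (fun u => counts.contains u && !PySem.Set.contains s u) vs := by
        apply List.filter_congr
        intro u hu
        have hne : u ≠ v := fun e => hv (e ▸ hu)
        have hcu : PySem.Set.contains (PySem.Set.add s v) u = PySem.Set.contains s u := by
          rw [Bool.eq_iff_iff, PySem.Set.contains_iff, PySem.Set.contains_iff,
            PySem.Set.mem_add]
          constructor
          · rintro (h' | rfl)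
            · exact h'
            · exact absurd rfl hne
          · exact Or.inl
        rw [hcu]
      rw [pvDD, if_neg h, ih _ hnd', hcongr, List.filter_cons]
      simp only [hpred]
      rw [if_pos trivial]

theorem pvEqLt (xs ys : List Int) (hx : xs.Pairwise (· < ·)) (hy : ys.Pairwise (· < ·))
    (h : ∀ v, v ∈ xs ↔ v ∈ ys) : xs = ys := by
  have ndx : xs.Nodup := hx.imp (fun h => ne_of_lt h)
  have ndy : ys.Nodup := hy.imp (fun h => ne_of_lt h)
  exact ((List.perm_ext_iff_of_nodup ndx ndy).mpr h).eq_of_pairwise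
    (fun a b _ _ h1 h2 => le_antisymm h1 h2) (hx.imp le_of_lt) (hy.imp le_of_lt)

theorem pvSortedFilter (xs : List Int) (q : Int → Bool) :
    PySem.List.sorted ((PySem.Set.ofList xs).filter q) (fun x => x) false
      = (PySem.List.sorted (PySem.Set.ofList xs) (fun x => x) false).filter q := by
  apply PySem.List.sorted_eq_of_perm_of_pairwise_lt
  · exact (PySem.List.sorted_perm _ _ _).filter q
  · exact (PySem.List.sorted_ofList_pairwise_lt xs).filter q

theorem pvDupvals (cells : List Int) (q : Int × Int → Bool) :
    (((PySem.Dict.counter cells).items.filter q).map Prod.fst)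
      = (PySem.Set.ofList cells).filter (fun v => q (v, (List.count v cells : Int))) := by
  rw [PySem.Dict.items_counter, List.filter_map, List.map_map,
    show (Prod.fst ∘ fun k => (k, (List.count k cells : Int))) = id from rfl, List.map_id]
  rfl

theorem pvBase_pairwise (e mt : Int) : (pvBase e mt).Pairwise (· < ·) := by
  unfold pvBase
  split_ifs <;> decide

theorem pvBase_mem (e mt v : Int) : v ∈ pvBase e mt ↔ pvActive e mt v = true := by
  unfold pvBase pvActive
  split_ifs <;> simp_all <;> omega

theorem pvCells_pos (board : List (List Int)) : ∀ v ∈ pvCells board, 0 < v := by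
  intro v hv
  simp only [pvCells, List.mem_flatMap, List.mem_filter, decide_eq_true_eq] at hv
  obtain ⟨r, _, _, hpos⟩ := hv
  exact hpos

theorem pvMain (cells : List Int) (e mt : Int) (hpos : ∀ v ∈ cells, 0 < v) :
    ((if 0 < pvSC e mt
        then (pvBase e mt ++ pvDup cells mt) ++ pvSing cells e mt
        else pvBase e mt ++ pvDup cells mt).foldl
      (fun (st : PySem.Set Int × List Int) v =>
        if !(PySem.Dict.counter cells).contains v || PySem.Set.contains st.1 v then st
        else (PySem.Set.add st.1 v, st.2 ++ [v]))
      (PySem.Set.empty, [])).2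
    = pvRHS cells e mt := by
  unfold pvRHS
  rw [pvFold, List.nil_append, PySem.Dict.keys_counter]
  have hmemcells : ∀ v : Int,
      (PySem.Dict.counter cells).contains v = true ↔ v ∈ cells := by
    intro v
    rw [PySem.Dict.contains_counter, List.contains_iff_mem]
  have hpres := PySem.List.sorted_ofList_pairwise_lt cells
  have hmempres : ∀ v : Int,
      v ∈ PySem.List.sorted (PySem.Set.ofList cells) (fun x => x) false ↔ v ∈ cells := by
    intro v
    rw [PySem.List.mem_sorted, PySem.Set.mem_ofList]
  have hdup : pvDup cells mt
      = (PySem.List.sorted (PySem.Set.ofList cells) (fun x => x) false).filter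
          (fun v => decide (2 ≤ (List.count v cells : Int)) && decide (v ≤ pvLC mt)) := by
    rw [pvDup, pvDupvals, pvSortedFilter]
  have hsing : pvSing cells e mt
      = (PySem.List.sorted (PySem.Set.ofList cells) (fun x => x) false).filter
          (fun v => ((List.count v cells : Int) == 1) && decide (v ≤ pvSC e mt)) := by
    rw [pvSing, pvDupvals, pvSortedFilter]
  have hbase_nd : (pvBase e mt).Nodup := (pvBase_pairwise e mt).imp (fun h => ne_of_lt h)
  have hdup_nd : (pvDup cells mt).Nodup := by
    rw [hdup]; exact ((hpres.filter _).imp (fun h => ne_of_lt h))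
  have hsing_nd : (pvSing cells e mt).Nodup := by
    rw [hsing]; exact ((hpres.filter _).imp (fun h => ne_of_lt h))
  -- the three blocks
  have E0 : pvDD (PySem.Dict.counter cells) (pvBase e mt) PySem.Set.empty
      = (PySem.List.sorted (PySem.Set.ofList cells) (fun x => x) false).filter
          (fun v => pvActive e mt v) := by
    rw [pvDD_filter _ _ _ hbase_nd]
    apply pvEqLt
    · exact (pvBase_pairwise e mt).filter _
    · exact hpres.filter _
    · intro v
      simp only [List.mem_filter, Bool.and_eq_true, Bool.not_eq_true',
        PySem.Set.contains_eq_listContains, PySem.Set.empty, List.contains_nil,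
        pvBase_mem, hmemcells, hmempres]
      tauto
  have hseen1 : ∀ v ∈ cells,
      (PySem.Set.contains (pvSeen (PySem.Dict.counter cells) (pvBase e mt) PySem.Set.empty) v)
        = pvActive e mt v := by
    intro v hv
    rw [Bool.eq_iff_iff, PySem.Set.contains_iff, pvSeen_mem]
    simp only [PySem.Set.empty, List.not_mem_nil, false_or, pvBase_mem, hmemcells]
    constructor
    · rintro ⟨ha, -⟩; exact ha
    · intro ha; exact ⟨ha, hv⟩
  have E1 : pvDD (PySem.Dict.counter cells) (pvDup cells mt)
        (pvSeen (PySem.Dict.counter cells) (pvBase e mt) PySem.Set.empty)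
      = (PySem.List.sorted (PySem.Set.ofList cells) (fun x => x) false).filter
          (fun v => !pvActive e mt v
            && decide (2 ≤ (PySem.Dict.counter cells).getD v 0) && decide (v ≤ pvLC mt)) := by
    rw [pvDD_filter _ _ _ hdup_nd, hdup, List.filter_filter]
    apply List.filter_congr
    intro v hv
    have hvc : v ∈ cells := (hmempres v).mp hv
    rw [hseen1 v hvc, (hmemcells v).mpr hvc, PySem.Dict.getD_counter]
    cases pvActive e mt v <;> cases decide (2 ≤ (List.count v cells : Int)) <;>
      cases decide (v ≤ pvLC mt) <;> rfl
  have hseen2 : ∀ v ∈ cells, (List.count v cells : Int) = 1 →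
      (PySem.Set.contains
        (pvSeen (PySem.Dict.counter cells) (pvBase e mt ++ pvDup cells mt) PySem.Set.empty) v)
        = pvActive e mt v := by
    intro v hv hc1
    rw [Bool.eq_iff_iff, PySem.Set.contains_iff, pvSeen_mem]
    simp only [PySem.Set.empty, List.not_mem_nil, false_or, List.mem_append, pvBase_mem,
      hmemcells]
    constructor
    · rintro ⟨ha | hd, -⟩
      · exact ha
      · rw [hdup] at hd
        rcases List.mem_filter.mp hd with ⟨-, hq⟩
        rcases Bool.and_eq_true .. |>.mp hq with ⟨hq2, -⟩
        rw [hc1] at hq2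
        exact absurd (of_decide_eq_true hq2) (by norm_num)
    · intro ha; exact ⟨Or.inl ha, hv⟩
  have E2 : pvDD (PySem.Dict.counter cells) (pvSing cells e mt)
        (pvSeen (PySem.Dict.counter cells) (pvBase e mt ++ pvDup cells mt) PySem.Set.empty)
      = (PySem.List.sorted (PySem.Set.ofList cells) (fun x => x) false).filter
          (fun v => !pvActive e mt v
            && ((PySem.Dict.counter cells).getD v 0 == 1) && decide (v ≤ pvSC e mt)) := by
    rw [pvDD_filter _ _ _ hsing_nd, hsing, List.filter_filter]
    apply List.filter_congr
    intro v hv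
    have hvc : v ∈ cells := (hmempres v).mp hv
    rw [(hmemcells v).mpr hvc, PySem.Dict.getD_counter]
    by_cases hc1 : (List.count v cells : Int) = 1
    · rw [hseen2 v hvc hc1, hc1]
      cases pvActive e mt v <;> cases decide (v ≤ pvSC e mt) <;> rfl
    · have hbeq : ((List.count v cells : Int) == 1) = false := by
        simp [hc1]
      simp [hbeq]
  by_cases hsc : 0 < pvSC e mt
  · rw [if_pos hsc, pvDD_append, pvDD_append, E0, E1, E2]
  · rw [if_neg hsc, pvDD_append, E0, E1]
    dsimp only
    have hsc0 : pvSC e mt = 0 := by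
      rw [pvSC] at hsc ⊢
      split_ifs at hsc ⊢ with h
      · exact absurd (lt_of_lt_of_le (by norm_num) (le_max_left 128 _)) hsc
      · rfl
    have hnil : (PySem.List.sorted (PySem.Set.ofList cells) (fun x => x) false).filter
          (fun v => !pvActive e mt v
            && ((PySem.Dict.counter cells).getD v 0 == 1) && decide (v ≤ pvSC e mt)) = [] := by
      apply List.filter_eq_nil_iff.mpr
      intro v hv
      have hvpos : 0 < v := hpos v ((hmempres v).mp hv)
      have : decide (v ≤ pvSC e mt) = false := by
        rw [hsc0]; simp; omega
      simp [this]
    rw [hnil, List.append_nil]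

-- ---- B-side lemmas: the group scan over a sorted list ----

-- the ascending distinct values that pvScan visits (one per adjacent group)
def pvDdAsc : List Int → List Int
  | [] => []
  | v :: rest => v :: pvDdAsc (rest.dropWhile (· == v))
  termination_by xs => xs.length
  decreasing_by
    simp only [List.length_cons]
    exact Nat.lt_succ_of_le (List.dropWhile_sublist _ |>.length_le)

theorem pvDdAsc_subset : ∀ xs : List Int, ∀ w ∈ pvDdAsc xs, w ∈ xs := by
  intro xs
  induction xs using pvDdAsc.induct with
  | case1 => intro w hw; rw [pvDdAsc] at hw; cases hw
  | case2 v rest ih =>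
    intro w hw
    rw [pvDdAsc] at hw
    rcases List.mem_cons.mp hw with rfl | hw'
    · exact List.mem_cons_self
    · exact List.mem_cons_of_mem _ ((List.dropWhile_sublist _).mem (ih w hw'))

theorem pvGroupGt {v : Int} {rest : List Int} (h : (v :: rest).Pairwise (· ≤ ·)) :
    ∀ w ∈ rest.dropWhile (· == v), v < w := by
  rcases List.pairwise_cons.mp h with ⟨hle, hrest⟩
  intro w hw
  have hge : v ≤ w := hle w ((List.dropWhile_sublist _).mem hw)
  rcases hd : rest.dropWhile (· == v) with _ | ⟨x, t⟩
  · rw [hd] at hw; cases hw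
  · have hx : ¬ ((· == v) x) = true := by
      have := List.head_dropWhile_not (· == v) (l := rest)
      rw [hd] at this
      simpa using this (by simp)
    have hxv : v < x := by
      have : v ≤ x := hle x ((List.dropWhile_sublist _).mem (hd ▸ List.mem_cons_self))
      rcases lt_or_eq_of_le this with h' | h'
      · exact h'
      · exact absurd (by simp [h'.symm]) hx
    have hpw : (x :: t).Pairwise (· ≤ ·) := hd ▸ List.Pairwise.sublist (List.dropWhile_sublist _) hrest
    rw [hd] at hw
    rcases List.mem_cons.mp hw with rfl | hw'
    · exact hxv
    · exact lt_of_lt_of_le hxv ((List.pairwise_cons.mp hpw).1 w hw')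

theorem pvHeadCount {v : Int} {rest : List Int} (h : (v :: rest).Pairwise (· ≤ ·)) :
    (List.count v (v :: rest) : Int) = 1 + (rest.takeWhile (· == v)).length := by
  have hsplit : rest = rest.takeWhile (· == v) ++ rest.dropWhile (· == v) :=
    (List.takeWhile_append_dropWhile).symm
  have htw : List.count v (rest.takeWhile (· == v)) = (rest.takeWhile (· == v)).length := by
    rw [List.count_eq_length]
    intro b hb
    have hb' : b = v := by simpa using List.mem_takeWhile_imp hb
    simp [hb']
  have hdw : List.count v (rest.dropWhile (· == v)) = 0 := by
    rw [List.count_eq_zero]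
    intro hv
    exact absurd (pvGroupGt h v hv) (lt_irrefl v)
  have hcr : List.count v rest
      = (rest.takeWhile (· == v)).length := by
    conv_lhs => rw [hsplit]
    rw [List.count_append, htw, hdw, Nat.add_zero]
  rw [List.count_cons_self, hcr]
  push_cast
  ring

theorem pvTailCount {v : Int} {rest : List Int} (h : (v :: rest).Pairwise (· ≤ ·))
    {w : Int} (hw : w ∈ rest.dropWhile (· == v)) :
    List.count w (v :: rest) = List.count w (rest.dropWhile (· == v)) := by
  have hgt := pvGroupGt h w hw
  have hsplit : rest = rest.takeWhile (· == v) ++ rest.dropWhile (· == v) :=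
    (List.takeWhile_append_dropWhile).symm
  have hne : w ≠ v := ne_of_gt hgt
  have htw : List.count w (rest.takeWhile (· == v)) = 0 := by
    rw [List.count_eq_zero]
    intro hv
    exact hne (by simpa using List.mem_takeWhile_imp hv)
  have hcr : List.count w rest = List.count w (rest.dropWhile (· == v)) := by
    conv_lhs => rw [hsplit]
    rw [List.count_append, htw, Nat.zero_add]
  rw [List.count_cons_of_ne (ne_of_lt hgt), hcr]

theorem pvTier_cases {v c e mt lc sc t : Int} (h : pvTier v c e mt lc sc = some t) :
    t = 0 ∨ t = 1 ∨ t = 2 := by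
  unfold pvTier at h
  split_ifs at h <;> simp_all

theorem pvScan_eq (e mt lc sc : Int) :
    ∀ xs : List Int, xs.Pairwise (· ≤ ·) →
    pvScan e mt lc sc xs =
      ((pvDdAsc xs).filter (fun v => pvTier v (List.count v xs : Int) e mt lc sc == some 0),
       (pvDdAsc xs).filter (fun v => pvTier v (List.count v xs : Int) e mt lc sc == some 1),
       (pvDdAsc xs).filter (fun v => pvTier v (List.count v xs : Int) e mt lc sc == some 2)) := by
  intro xs
  induction xs using pvDdAsc.induct with
  | case1 => intro _; simp [pvScan, pvDdAsc]
  | case2 v rest ih =>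
    intro hpw
    have hrest' : (rest.dropWhile (· == v)).Pairwise (· ≤ ·) :=
      List.Pairwise.sublist (List.dropWhile_sublist _) (List.pairwise_cons.mp hpw).2
    have hcnt := pvHeadCount hpw
    have hcongr : ∀ (t : Int),
        (pvDdAsc (rest.dropWhile (· == v))).filter
          (fun w => pvTier w (List.count w (rest.dropWhile (· == v)) : Int) e mt lc sc == some t)
        = (pvDdAsc (rest.dropWhile (· == v))).filter
          (fun w => pvTier w (List.count w (v :: rest) : Int) e mt lc sc == some t) := by
      intro t
      apply List.filter_congr
      intro w hw
      rw [pvTailCount hpw (pvDdAsc_subset _ w hw)]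
    rw [pvScan, pvDdAsc, ih hrest']
    simp only [List.filter_cons, hcnt]
    rcases ht : pvTier v (1 + ((rest.takeWhile (· == v)).length : Int)) e mt lc sc
      with _ | t
    · simp [hcongr 0, hcongr 1, hcongr 2]
    · rcases pvTier_cases ht with rfl | rfl | rfl <;>
        simp [hcongr 0, hcongr 1, hcongr 2]

theorem pvDdAsc_pairwise : ∀ xs : List Int, xs.Pairwise (· ≤ ·) →
    (pvDdAsc xs).Pairwise (· < ·) := by
  intro xs
  induction xs using pvDdAsc.induct with
  | case1 => intro _; simp [pvDdAsc]
  | case2 v rest ih =>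
    intro hpw
    rw [pvDdAsc, List.pairwise_cons]
    refine ⟨fun w hw => pvGroupGt hpw w (pvDdAsc_subset _ w hw),
      ih (List.Pairwise.sublist (List.dropWhile_sublist _) (List.pairwise_cons.mp hpw).2)⟩

theorem pvDdAsc_mem : ∀ xs : List Int, ∀ w, w ∈ xs → w ∈ pvDdAsc xs := by
  intro xs
  induction xs using pvDdAsc.induct with
  | case1 => intro w hw; cases hw
  | case2 v rest ih =>
    intro w hw
    rw [pvDdAsc]
    rcases List.mem_cons.mp hw with rfl | hw'
    · exact List.mem_cons_self
    · by_cases hwv : w = v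
      · exact hwv ▸ List.mem_cons_self
      · have : w ∈ rest.dropWhile (· == v) := by
          have hsplit : rest = rest.takeWhile (· == v) ++ rest.dropWhile (· == v) :=
            (List.takeWhile_append_dropWhile).symm
          rcases List.mem_append.mp (hsplit ▸ hw') with h | h
          · exact absurd (by simpa using List.mem_takeWhile_imp h) hwv
          · exact h
        exact List.mem_cons_of_mem _ (ih w this)

theorem pvActive_iff (e mt v : Int) :
    pvActive e mt v = true ↔
      ((v = 2 ∨ v = 4 ∨ v = 8)
        ∨ ((v = 16 ∨ v = 32) ∧ e ≤ 5)
        ∨ (v = 64 ∧ 1024 ≤ mt ∧ e ≤ 5)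
        ∨ (v = 128 ∧ 2048 ≤ mt ∧ e ≤ 4)
        ∨ (v = 256 ∧ 4096 ≤ mt ∧ e ≤ 3)) := by
  unfold pvActive
  split_ifs <;> simp_all
  omega

theorem pvTier0_iff (v c e mt lc sc : Int) :
    (pvTier v c e mt lc sc == some 0) = pvActive e mt v := by
  rw [Bool.eq_iff_iff, beq_iff_eq, pvActive_iff]
  unfold pvTier
  split_ifs with h1 h2 h3 <;> simp_all

theorem pvTier1_iff (v c e mt lc sc : Int) :
    (pvTier v c e mt lc sc == some 1)
      = (!pvActive e mt v && decide (2 ≤ c) && decide (v ≤ lc)) := by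
  rw [Bool.eq_iff_iff, beq_iff_eq]
  unfold pvTier
  split_ifs with h1 h2 h3
  · have hA : pvActive e mt v = true := (pvActive_iff e mt v).mpr h1
    simp [hA]
  · have hA : pvActive e mt v = false := by
      rw [← Bool.not_eq_true, pvActive_iff]; exact h1
    simp [hA, h2.1, h2.2]
  · have hA : pvActive e mt v = false := by
      rw [← Bool.not_eq_true, pvActive_iff]; exact h1
    simp only [hA, Bool.not_false, Bool.true_and]
    constructor
    · intro h; cases h
    · intro h
      exact absurd ⟨of_decide_eq_true (Bool.and_eq_true .. |>.mp h).1,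
        of_decide_eq_true (Bool.and_eq_true .. |>.mp h).2⟩ h2
  · have hA : pvActive e mt v = false := by
      rw [← Bool.not_eq_true, pvActive_iff]; exact h1
    simp only [hA, Bool.not_false, Bool.true_and]
    constructor
    · intro h; cases h
    · intro h
      exact absurd ⟨of_decide_eq_true (Bool.and_eq_true .. |>.mp h).1,
        of_decide_eq_true (Bool.and_eq_true .. |>.mp h).2⟩ h2

theorem pvTier2_iff (v c e mt lc sc : Int) :
    (pvTier v c e mt lc sc == some 2)
      = (!pvActive e mt v && (c == 1) && decide (v ≤ sc)) := by
  rw [Bool.eq_iff_iff, beq_iff_eq]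
  unfold pvTier
  split_ifs with h1 h2 h3
  · have hA : pvActive e mt v = true := (pvActive_iff e mt v).mpr h1
    simp [hA]
  · have hA : pvActive e mt v = false := by
      rw [← Bool.not_eq_true, pvActive_iff]; exact h1
    simp only [hA, Bool.not_false, Bool.true_and]
    constructor
    · intro h; cases h
    · intro h
      rcases Bool.and_eq_true .. |>.mp h with ⟨hc, -⟩
      have : c = 1 := by simpa using hc
      omega
  · have hA : pvActive e mt v = false := by
      rw [← Bool.not_eq_true, pvActive_iff]; exact h1
    simp [hA, h3.1, h3.2]
  · have hA : pvActive e mt v = false := by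
      rw [← Bool.not_eq_true, pvActive_iff]; exact h1
    simp only [hA, Bool.not_false, Bool.true_and]
    constructor
    · intro h; cases h
    · intro h
      rcases Bool.and_eq_true .. |>.mp h with ⟨hc, hsc'⟩
      have hc1 : c = 1 := by simpa using hc
      exact absurd ⟨hc1, of_decide_eq_true hsc'⟩ h3

theorem pvBMain (cells : List Int) (e mt : Int) :
    (let bs := pvScan e mt (pvLC mt) (pvSC e mt)
        (PySem.List.sorted cells (fun x => x) false)
     bs.1 ++ bs.2.1 ++ bs.2.2) = pvRHS cells e mt := by
  have htiles : (PySem.List.sorted cells (fun x => x) false).Pairwise (· ≤ ·) :=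
    PySem.List.sorted_pairwise cells (fun x => x)
  have hperm : (PySem.List.sorted cells (fun x => x) false).Perm cells :=
    PySem.List.sorted_perm cells (fun x => x) false
  have hdd : pvDdAsc (PySem.List.sorted cells (fun x => x) false)
      = PySem.List.sorted (PySem.Dict.counter cells).keys (fun x => x) false := by
    rw [PySem.Dict.keys_counter]
    apply pvEqLt
    · exact pvDdAsc_pairwise _ htiles
    · exact PySem.List.sorted_ofList_pairwise_lt cells
    · intro w
      rw [PySem.List.mem_sorted, PySem.Set.mem_ofList]
      constructor
      · intro hw; exact hperm.mem_iff.mp (pvDdAsc_subset _ w hw)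
      · intro hw; exact pvDdAsc_mem _ w (hperm.mem_iff.mpr hw)
  have hcount : ∀ w : Int,
      List.count w (PySem.List.sorted cells (fun x => x) false) = List.count w cells := by
    intro w; exact hperm.count_eq w
  have F0 : (pvDdAsc (PySem.List.sorted cells (fun x => x) false)).filter
        (fun v => pvTier v (List.count v (PySem.List.sorted cells (fun x => x) false) : Int)
          e mt (pvLC mt) (pvSC e mt) == some 0)
      = (PySem.List.sorted (PySem.Dict.counter cells).keys (fun x => x) false).filter
          (fun v => pvActive e mt v) := by
    rw [hdd]
    apply List.filter_congr
    intro v _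
    rw [hcount, pvTier0_iff]
  have F1 : (pvDdAsc (PySem.List.sorted cells (fun x => x) false)).filter
        (fun v => pvTier v (List.count v (PySem.List.sorted cells (fun x => x) false) : Int)
          e mt (pvLC mt) (pvSC e mt) == some 1)
      = (PySem.List.sorted (PySem.Dict.counter cells).keys (fun x => x) false).filter
          (fun v => !pvActive e mt v
            && decide (2 ≤ (PySem.Dict.counter cells).getD v 0) && decide (v ≤ pvLC mt)) := by
    rw [hdd]
    apply List.filter_congr
    intro v _
    rw [hcount, pvTier1_iff, PySem.Dict.getD_counter]
  have F2 : (pvDdAsc (PySem.List.sorted cells (fun x => x) false)).filter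
        (fun v => pvTier v (List.count v (PySem.List.sorted cells (fun x => x) false) : Int)
          e mt (pvLC mt) (pvSC e mt) == some 2)
      = (PySem.List.sorted (PySem.Dict.counter cells).keys (fun x => x) false).filter
          (fun v => !pvActive e mt v
            && ((PySem.Dict.counter cells).getD v 0 == 1) && decide (v ≤ pvSC e mt)) := by
    rw [hdd]
    apply List.filter_congr
    intro v _
    rw [hcount, pvTier2_iff, PySem.Dict.getD_counter]
  show (pvScan e mt (pvLC mt) (pvSC e mt) (PySem.List.sorted cells (fun x => x) false)).1
      ++ (pvScan e mt (pvLC mt) (pvSC e mt) (PySem.List.sorted cells (fun x => x) false)).2.1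
      ++ (pvScan e mt (pvLC mt) (pvSC e mt) (PySem.List.sorted cells (fun x => x) false)).2.2
    = pvRHS cells e mt
  rw [pvScan_eq e mt (pvLC mt) (pvSC e mt) _ htiles]
  unfold pvRHS
  rw [← F0, ← F1, ← F2]

-- ===== VERDICT (by name: the statement is the Claim_ definition above) =====
theorem delete_candidates_py_spec : Claim_equal_delete_candidates_py := by
  intro board e mt _ _
  show delete_candidates_py board e mt = delete_candidates_py_alt board e mt
  exact (pvMain (pvCells board) e mt (pvCells_pos board)).trans (pvBMain (pvCells board) e mt).symm
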